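-- pv_equiv track=rewrite | github.com/Sadalmalik/KnowledgeBase | main.py | TryCollapseDicts
-- ===== SOURCE A (Python) =====
-- def TryCollapseDicts(dicts):
--     keys = set()
--     for d in dicts:
--         keys |= d.keys()
--     result = dict()
--     for d in dicts:
--         for k in keys:
--             if k not in d:
--                 continue
--             if k not in result:
--                 result[k] = d[k]
--                 continue
--             if result[k] != d[k]:
--                 return None
--     return result
-- ===== SOURCE B (Python) =====
-- def TryCollapseDicts(dicts):
--     # Phase 1: group every value under its key, one pass over all items.
--     groups = {}
--     for d in dicts:
--         for k, v in d.items():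
--             groups.setdefault(k, []).append(v)
--     # Phase 2: validate each group against its first value, then emit it.
--     result = {}
--     for k, vs in groups.items():
--         first = vs[0]
--         for v in vs[1:]:
--             if v != first:
--                 return None
--         result[k] = first
--     return result
-- ===== Notes on version B (the rewrite author's own statement) =====
-- stated objective: faster
-- what changed: Replaces A's incremental merge that rescans the whole key set for every dict with a two-phase collect-then-validate: one pass groups all values by key, a second pass checks each group against its first value.
import Mathlib
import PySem

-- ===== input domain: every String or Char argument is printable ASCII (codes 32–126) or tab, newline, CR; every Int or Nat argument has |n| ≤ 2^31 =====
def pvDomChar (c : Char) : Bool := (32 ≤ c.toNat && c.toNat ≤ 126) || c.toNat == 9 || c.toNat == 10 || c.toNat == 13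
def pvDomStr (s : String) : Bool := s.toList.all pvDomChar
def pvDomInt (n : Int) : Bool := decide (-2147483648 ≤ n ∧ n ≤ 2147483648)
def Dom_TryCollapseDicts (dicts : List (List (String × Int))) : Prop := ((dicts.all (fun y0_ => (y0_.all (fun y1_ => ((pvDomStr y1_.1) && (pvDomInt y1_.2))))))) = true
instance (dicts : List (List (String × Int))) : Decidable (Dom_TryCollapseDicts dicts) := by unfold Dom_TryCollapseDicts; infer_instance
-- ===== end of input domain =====

-- B replaces A's merge that rescans the whole key set for every dict by a two-phase
-- collect-then-validate pass (group values by key, then check each group against its first value).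


-- ===== PORT A =====
-- inner loop of A: 'for k in keys: ...' for one dict d (none = the 'return None' branch)
def aInner (d : List (String × Int)) (keys : List String)
    (result : PySem.Dict String Int) : Option (PySem.Dict String Int) :=
  match keys with
  | [] => some result
  | k :: ks =>
    match (PySem.Dict.mk d).get? k with
    | none => aInner d ks result                         -- k not in d: continue
    | some v =>
      match result.get? k with
      | none => aInner d ks (result.insert k v)          -- result[k] = d[k]; continue
      | some w => if w ≠ v then none else aInner d ks result

-- outer loop of A: 'for d in dicts: ...'
def aOuter (dicts : List (List (String × Int))) (keys : List String)
    (result : PySem.Dict String Int) : Option (PySem.Dict String Int) :=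
  match dicts with
  | [] => some result
  | d :: rest =>
    match aInner d keys result with
    | none => none
    | some r => aOuter rest keys r

def TryCollapseDicts (dicts : List (List (String × Int))) : Option (List (String × Int)) :=
  let keys : PySem.Set String :=
    dicts.foldl (fun ks d => PySem.Set.union ks (d.map (·.1))) PySem.Set.empty
  (aOuter dicts keys PySem.Dict.empty).map PySem.Dict.items

-- ===== PORT B =====
-- phase 1 of B: groups.setdefault(k, []).append(v) over all dicts
def bGroups (dicts : List (List (String × Int))) : PySem.Dict String (List Int) :=
  dicts.foldl (fun g d => d.foldl (fun g p => g.modify p.1 [] (· ++ [p.2])) g) PySem.Dict.empty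

-- phase 2 of B: validate each group against its first value, then emit it
-- (the [] branch is Python's vs[0] IndexError; groups never holds an empty list)
def bCollect (items : List (String × List Int))
    (result : PySem.Dict String Int) : Option (PySem.Dict String Int) :=
  match items with
  | [] => some result
  | (k, vs) :: rest =>
    match vs with
    | [] => none
    | first :: tail =>
      if tail.any (fun v => v ≠ first) then none
      else bCollect rest (result.insert k first)

def TryCollapseDicts_alt (dicts : List (List (String × Int))) : Option (List (String × Int)) :=
  (bCollect (bGroups dicts).items PySem.Dict.empty).map PySem.Dict.items

-- ===== PRECONDITION & SPEC =====
-- Pre_ excludes association lists carrying a duplicate key inside one dict: such a value can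
-- never arise from a Python dict, so neither program's behaviour there is specified.
def Pre_TryCollapseDicts (dicts : List (List (String × Int))) : Prop :=
  ∀ d ∈ dicts, (d.map (·.1)).Nodup
instance (dicts : List (List (String × Int))) : Decidable (Pre_TryCollapseDicts dicts) := by
  unfold Pre_TryCollapseDicts; infer_instance
def pvWitness_TryCollapseDicts : (List (List (String × Int))) :=
  [[("a", 1), ("b", 2)], [("b", 2), ("c", 3)]]

def Spec_TryCollapseDicts (dicts : List (List (String × Int))) (out : Option (List (String × Int))) : Prop := out = TryCollapseDicts_alt dicts
instance (dicts : List (List (String × Int))) (out : Option (List (String × Int))) : Decidable (Spec_TryCollapseDicts dicts out) := by unfold Spec_TryCollapseDicts; infer_instance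

-- ===== CLAIM (what is proved, stated in full; the proofs are below) =====
def Claim_equal_TryCollapseDicts : Prop := ∀ (dicts : List (List (String × Int))), Dom_TryCollapseDicts dicts → Pre_TryCollapseDicts dicts → Spec_TryCollapseDicts dicts (TryCollapseDicts dicts)

-- ===== LEMMAS AND PROOFS =====

-- all keys occurring anywhere, first occurrences in order
def allKeys (dicts : List (List (String × Int))) : List String :=
  PySem.Set.ofList (dicts.flatMap (fun d => d.map (·.1)))

-- all values stored under key k, in traversal order
def vals (k : String) (dicts : List (List (String × Int))) : List Int :=
  dicts.flatMap (fun d => (d.filter (fun p => p.1 == k)).map (·.2))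

-- per-key agreement of all values with the first one
def goodB (dicts : List (List (String × Int))) : Bool :=
  (allKeys dicts).all (fun k =>
    match vals k dicts with
    | [] => true
    | v :: t => t.all (fun w => w == v))

-- the common result when all groups agree
def M (dicts : List (List (String × Int))) : List (String × Int) :=
  (allKeys dicts).map (fun k => (k, (vals k dicts).headD 0))

theorem vals_append (k : String) (xs ys : List (List (String × Int))) :
    vals k (xs ++ ys) = vals k xs ++ vals k ys := by
  simp [vals]

theorem get?_mk_map {f : String → Int} (l : List String) (k : String) :
    (PySem.Dict.mk (l.map (fun x => (x, f x)))).get? k =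
      if k ∈ l then some (f k) else none := by
  induction l with
  | nil => simp [PySem.Dict.get?]
  | cons x xs ih =>
    simp only [List.map_cons, PySem.Dict.get?_mk_cons, List.mem_cons]
    by_cases h : x = k
    · simp [h]
    · have : (x == k) = false := by simp [h]
      simp [this, ih, Ne.symm h]


def confl (d : List (String × Int)) (r : PySem.Dict String Int) (k : String) : Bool :=
  match (PySem.Dict.mk d).get? k, r.get? k with
  | some v, some w => w ≠ v
  | _, _ => false

theorem pvAnyCongr {α : Type} (l : List α) (p q : α → Bool) (h : ∀ x ∈ l, p x = q x) :
    l.any p = l.any q := by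
  induction l with
  | nil => rfl
  | cons a t ih => simp only [List.any_cons, h a (by simp), ih (fun x hx => h x (by simp [hx]))]

theorem aInner_spec (d : List (String × Int)) (keys : List String) (hks : keys.Nodup)
    (r : PySem.Dict String Int) :
    aInner d keys r =
      if keys.any (confl d r) then none
      else some (PySem.Dict.mk (r.items ++
        (keys.filter (fun k => (PySem.Dict.mk d).contains k && !(r.contains k))).map
          (fun k => (k, (PySem.Dict.mk d).getD k 0)))) := by
  induction keys generalizing r with
  | nil => simp [aInner]
  | cons k ks ih =>
    obtain ⟨hk, hksn⟩ := List.nodup_cons.mp hks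
    rw [aInner]
    cases hdv : (PySem.Dict.mk d).get? k with
    | none =>
      have hc : confl d r k = false := by simp [confl, hdv]
      have hcon : (PySem.Dict.mk d).contains k = false := by
        rw [PySem.Dict.contains_eq_isSome_get?, hdv]; rfl
      dsimp only
      rw [ih hksn r]
      simp only [List.any_cons, hc, Bool.false_or, List.filter_cons, hcon, Bool.false_and,
        Bool.false_eq_true, if_false]
    | some v =>
      cases hrv : r.get? k with
      | none =>
        dsimp only
        have hc : confl d r k = false := by simp [confl, hdv, hrv]
        have hrc : r.contains k = false := by
          rw [PySem.Dict.contains_eq_isSome_get?, hrv]; rfl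
        have hdc : (PySem.Dict.mk d).contains k = true := by
          rw [PySem.Dict.contains_eq_isSome_get?, hdv]; rfl
        rw [ih hksn (r.insert k v)]
        have hany : ks.any (confl d (r.insert k v)) = ks.any (confl d r) :=
          pvAnyCongr _ _ _ (fun x hx => by
            have hne : x ≠ k := fun h => hk (h ▸ hx)
            simp [confl, PySem.Dict.get?_insert_of_ne r v hne])
        have hfil : ks.filter (fun x => (PySem.Dict.mk d).contains x && !((r.insert k v).contains x))
            = ks.filter (fun x => (PySem.Dict.mk d).contains x && !(r.contains x)) := by
          apply List.filter_congr
          intro x hx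
          have hne : x ≠ k := fun h => hk (h ▸ hx)
          have hbe : (x == k) = false := beq_eq_false_iff_ne.mpr hne
          simp [PySem.Dict.contains_insert, hbe]
        rw [hany, hfil, PySem.Dict.items_insert_of_not_contains r v hrc]
        have hgd : (PySem.Dict.mk d).getD k 0 = v := PySem.Dict.getD_of_get?_eq_some _ 0 hdv
        simp only [List.any_cons, hc, Bool.false_or, List.filter_cons, hdc, hrc,
          Bool.not_false, Bool.and_self]
        split <;> simp [hgd]
      | some w =>
        dsimp only
        by_cases hwv : w = v
        · subst hwv
          have hc : confl d r k = false := by simp [confl, hdv, hrv]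
          have hrc : r.contains k = true := by
            rw [PySem.Dict.contains_eq_isSome_get?, hrv]; rfl
          simp only [ne_eq, not_true_eq_false, if_false, ih hksn r, List.any_cons, hc,
            Bool.false_or, List.filter_cons, hrc, Bool.not_true, Bool.and_false,
            Bool.false_eq_true, if_false]
        · have hc : confl d r k = true := by simp [confl, hdv, hrv, hwv]
          simp [hwv, List.any_cons, hc]

-- Set.update with a Nodup argument appends exactly the fresh elements, in order
theorem update_eq_append (s l : List String) (hl : l.Nodup) :
    PySem.Set.update s l = s ++ l.filter (fun x => !(s.contains x)) := by
  induction l generalizing s with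
  | nil => simp [PySem.Set.update]
  | cons x xs ih =>
    obtain ⟨hx, hxs⟩ := List.nodup_cons.mp hl
    show PySem.Set.update (PySem.Set.add s x) xs = _
    by_cases hc : s.contains x = true
    · have hadd : PySem.Set.add s x = s := by
        show (if s.contains x = true then s else s ++ [x]) = s
        rw [hc]; simp
      rw [hadd, ih s hxs, List.filter_cons, hc]
      simp
    · have hcf : s.contains x = false := by simpa using hc
      have hadd : PySem.Set.add s x = s ++ [x] := by
        show (if s.contains x = true then s else s ++ [x]) = s ++ [x]
        rw [hcf]; simp
      rw [hadd, ih _ hxs, List.filter_cons, hcf]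
      have hfil : xs.filter (fun y => !((s ++ [x]).contains y)) = xs.filter (fun y => !(s.contains y)) := by
        apply List.filter_congr
        intro y hy
        have hne : y ≠ x := fun h => hx (h ▸ hy)
        have : (s ++ [x]).contains y = s.contains y := by
          simp [hne]
        rw [this]
      rw [hfil]
      simp [List.append_assoc]

-- Set.update always appends some list of elements new to s
theorem update_exists_append (s l : List String) :
    ∃ t, PySem.Set.update s l = s ++ t ∧ ∀ x ∈ t, x ∉ s := by
  induction l generalizing s with
  | nil => exact ⟨[], by simp [PySem.Set.update], by simp⟩
  | cons x xs ih =>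
    show ∃ t, PySem.Set.update (PySem.Set.add s x) xs = s ++ t ∧ _
    by_cases hc : s.contains x = true
    · have hadd : PySem.Set.add s x = s := by
        show (if s.contains x = true then s else s ++ [x]) = s
        rw [hc]; simp
      rw [hadd]; exact ih s
    · have hcf : s.contains x = false := by simpa using hc
      have hadd : PySem.Set.add s x = s ++ [x] := by
        show (if s.contains x = true then s else s ++ [x]) = s ++ [x]
        rw [hcf]; simp
      obtain ⟨t, ht, hfresh⟩ := ih (s ++ [x])
      refine ⟨x :: t, by rw [hadd, ht]; simp [List.append_assoc], ?_⟩
      intro y hy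
      rcases List.mem_cons.mp hy with h | h
      · subst h; simpa using hcf
      · intro hmem; exact hfresh y h (by simp [hmem])

theorem allKeys_append (xs ys : List (List (String × Int))) :
    allKeys (xs ++ ys) = PySem.Set.update (allKeys xs) (ys.flatMap (fun d => d.map (·.1))) := by
  show (List.flatMap _ (xs ++ ys)).foldl PySem.Set.add _ = _
  rw [List.flatMap_append, List.foldl_append]
  rfl

theorem mem_allKeys_iff (k : String) (xs : List (List (String × Int))) :
    k ∈ allKeys xs ↔ vals k xs ≠ [] := by
  rw [allKeys, PySem.Set.mem_ofList]
  simp only [vals, List.mem_flatMap, List.mem_map, ne_eq]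
  constructor
  · rintro ⟨d, hd, p, hp, rfl⟩ hnil
    rw [List.eq_nil_iff_forall_not_mem] at hnil
    exact hnil p.2 (List.mem_flatMap.mpr ⟨d, hd, List.mem_map.mpr ⟨p, List.mem_filter.mpr ⟨hp, by simp⟩, rfl⟩⟩)
  · intro h
    rcases List.exists_mem_of_ne_nil _ h with ⟨v, hv⟩
    rcases List.mem_flatMap.mp hv with ⟨d, hd, hvd⟩
    rcases List.mem_map.mp hvd with ⟨p, hpf, rfl⟩
    rcases List.mem_filter.mp hpf with ⟨hp, hk⟩
    exact ⟨d, hd, p, hp, by simpa using hk⟩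

theorem vals_cons (k : String) (d : List (String × Int)) (xs : List (List (String × Int))) :
    vals k (d :: xs) = (d.filter (fun p => p.1 == k)).map (·.2) ++ vals k xs := by
  simp [vals]

-- one Nodup dict holds at most one value per key, the one get? finds
theorem filter_key_eq (d : List (String × Int)) (hd : (d.map (·.1)).Nodup) (k : String) :
    (d.filter (fun p => p.1 == k)).map (·.2) =
      match (PySem.Dict.mk d).get? k with | some v => [v] | none => [] := by
  induction d with
  | nil => rfl
  | cons p rest ih =>
    have hnd : (p.1 :: rest.map (·.1)).Nodup := by simpa using hd
    obtain ⟨hp, hrest⟩ := List.nodup_cons.mp hnd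
    rw [List.filter_cons, PySem.Dict.get?_mk_cons]
    by_cases h : (p.1 == k) = true
    · have hk : p.1 = k := by simpa using h
      have hfr : rest.filter (fun q => q.1 == k) = [] := by
        apply List.filter_eq_nil_iff.mpr
        intro q hq hqk
        exact hp (by rw [hk, ← show q.1 = k by simpa using hqk]; exact List.mem_map.mpr ⟨q, hq, rfl⟩)
      simp [h, hfr]
    · have hf : (p.1 == k) = false := by simpa using h
      simp only [hf, Bool.false_eq_true, if_false]
      exact ih hrest

theorem headD_append_of_ne_nil {a b : List Int} (h : a ≠ []) (x : Int) :
    (a ++ b).headD x = a.headD x := by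
  cases a with
  | nil => exact absurd rfl h
  | cons y ys => rfl

theorem goodB_iff (xs : List (List (String × Int))) :
    goodB xs = true ↔ ∀ k : String, ∀ v ∈ vals k xs, v = (vals k xs).headD 0 := by
  unfold goodB
  rw [List.all_eq_true]
  constructor
  · intro h k v hv
    have hk : k ∈ allKeys xs :=
      (mem_allKeys_iff k xs).mpr (fun hnil => by rw [hnil] at hv; exact absurd hv (by simp))
    have hh := h k hk
    cases hvals : vals k xs with
    | nil => rw [hvals] at hv; exact absurd hv (by simp)
    | cons v0 t =>
      rw [hvals] at hh hv
      rcases List.mem_cons.mp hv with rfl | hvt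
      · rfl
      · have hall : t.all (fun w => w == v0) = true := by simpa using hh
        have := List.all_eq_true.mp hall v hvt
        simpa using this
  · intro h k hk
    cases hvals : vals k xs with
    | nil => rfl
    | cons v0 t =>
      show t.all (fun w => w == v0) = true
      apply List.all_eq_true.mpr
      intro w hw
      have := h k w (by rw [hvals]; exact List.mem_cons_of_mem _ hw)
      rw [hvals] at this
      simpa using this

theorem aOuter_spec (ds pre : List (List (String × Int)))
    (hnd : ∀ d ∈ pre ++ ds, (d.map (·.1)).Nodup)
    (hg : goodB pre = true) :
    aOuter ds (allKeys (pre ++ ds)) (PySem.Dict.mk (M pre)) =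
      if goodB (pre ++ ds) then some (PySem.Dict.mk (M (pre ++ ds))) else none := by
  induction ds generalizing pre with
  | nil => rw [List.append_nil, aOuter, hg]; rfl
  | cons d rest ih =>
    have hdn : (d.map (·.1)).Nodup := hnd d (by simp)
    have hksnd : (allKeys (pre ++ d :: rest)).Nodup := PySem.Set.nodup_ofList _
    have hrget : ∀ k, (PySem.Dict.mk (M pre)).get? k =
        if k ∈ allKeys pre then some ((vals k pre).headD 0) else none :=
      fun k => get?_mk_map (allKeys pre) k
    have hrcont : ∀ k, (PySem.Dict.mk (M pre)).contains k = decide (k ∈ allKeys pre) := by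
      intro k
      rw [PySem.Dict.contains_eq_isSome_get?, hrget k]
      by_cases h : k ∈ allKeys pre <;> simp [h]
    have hdcont : ∀ k, (PySem.Dict.mk d).contains k = decide (k ∈ d.map (·.1)) := by
      intro k
      rw [PySem.Dict.contains_eq_decide_mem_keys, PySem.Dict.keys_mk]
    have hsubpre : ∀ k, k ∈ allKeys pre → k ∈ allKeys (pre ++ d :: rest) := by
      intro k hk
      rw [mem_allKeys_iff] at hk ⊢
      rw [vals_append]
      exact fun h => hk (List.append_eq_nil_iff.mp h).1
    have hvals_single : ∀ k, vals k [d] =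
        (match (PySem.Dict.mk d).get? k with | some v => [v] | none => []) := by
      intro k
      rw [vals_cons, ← filter_key_eq d hdn k]
      simp [vals]
    rw [aOuter, aInner_spec d _ hksnd (PySem.Dict.mk (M pre))]
    cases hc : (allKeys (pre ++ d :: rest)).any (confl d (PySem.Dict.mk (M pre))) with
    | true =>
      rw [if_pos rfl]
      rcases List.any_eq_true.mp hc with ⟨k, hkks, hconfl⟩
      unfold confl at hconfl
      cases hdk : (PySem.Dict.mk d).get? k with
      | none => rw [hdk] at hconfl; exact absurd hconfl (by simp)
      | some v =>
        cases hrk : (PySem.Dict.mk (M pre)).get? k with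
        | none => rw [hdk, hrk] at hconfl; exact absurd hconfl (by simp)
        | some w =>
          rw [hdk, hrk] at hconfl
          have hwv : w ≠ v := by simpa using hconfl
          have hmem : k ∈ allKeys pre := by
            by_contra hm
            rw [hrget k, if_neg hm] at hrk
            exact absurd hrk (by simp)
          have hw : w = (vals k pre).headD 0 := by
            rw [hrget k, if_pos hmem] at hrk
            exact (Option.some.inj hrk).symm
          cases hgb : goodB (pre ++ d :: rest) with
          | false => rfl
          | true =>
            exfalso
            have hvmem : v ∈ vals k (pre ++ d :: rest) := by
              rw [vals_append, vals_cons, filter_key_eq d hdn k, hdk]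
              simp
            have hne : vals k pre ≠ [] := (mem_allKeys_iff k pre).mp hmem
            have := goodB_iff (pre ++ d :: rest) |>.mp hgb k v hvmem
            rw [vals_append, headD_append_of_ne_nil hne] at this
            exact hwv (by rw [hw, ← this])
    | false =>
      simp only [Bool.false_eq_true, if_false]
      have hF := update_eq_append (allKeys pre) (d.map (·.1)) hdn
      have h1 : allKeys (pre ++ [d]) =
          allKeys pre ++ (d.map (·.1)).filter (fun x => !((allKeys pre).contains x)) := by
        rw [allKeys_append pre [d]]
        simpa using hF
      obtain ⟨L, hL, hLfresh⟩ := update_exists_append (allKeys (pre ++ [d])) (rest.flatMap (fun d => d.map (·.1)))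
      have hksL : allKeys (pre ++ d :: rest) = allKeys (pre ++ [d]) ++ L := by
        rw [show pre ++ d :: rest = (pre ++ [d]) ++ rest by simp, allKeys_append (pre ++ [d]) rest]
        exact hL
      have hmemF : ∀ x ∈ (d.map (·.1)).filter (fun y => !((allKeys pre).contains y)),
          x ∈ d.map (·.1) ∧ x ∉ allKeys pre := by
        intro x hx
        rcases List.mem_filter.mp hx with ⟨h1', h2'⟩
        exact ⟨h1', by simpa using h2'⟩
      have hfilter : (allKeys (pre ++ d :: rest)).filter
            (fun k => (PySem.Dict.mk d).contains k && !((PySem.Dict.mk (M pre)).contains k))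
          = (d.map (·.1)).filter (fun y => !((allKeys pre).contains y)) := by
        rw [hksL, h1, List.filter_append, List.filter_append]
        have e1 : (allKeys pre).filter
            (fun k => (PySem.Dict.mk d).contains k && !((PySem.Dict.mk (M pre)).contains k)) = [] := by
          apply List.filter_eq_nil_iff.mpr
          intro x hx
          rw [hrcont x, decide_eq_true hx]
          simp
        have e2 : ((d.map (·.1)).filter (fun y => !((allKeys pre).contains y))).filter
            (fun k => (PySem.Dict.mk d).contains k && !((PySem.Dict.mk (M pre)).contains k))
            = (d.map (·.1)).filter (fun y => !((allKeys pre).contains y)) := by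
          apply List.filter_eq_self.mpr
          intro x hx
          rcases hmemF x hx with ⟨hxd, hxp⟩
          rw [hdcont x, decide_eq_true hxd, hrcont x, decide_eq_false hxp]
          rfl
        have e3 : L.filter
            (fun k => (PySem.Dict.mk d).contains k && !((PySem.Dict.mk (M pre)).contains k)) = [] := by
          apply List.filter_eq_nil_iff.mpr
          intro x hx
          have hxnot : x ∉ allKeys (pre ++ [d]) := hLfresh x hx
          have hxd : x ∉ d.map (·.1) := by
            intro hmem
            apply hxnot
            rw [mem_allKeys_iff, vals_append]
            have : vals x [d] ≠ [] :=
              (mem_allKeys_iff x [d]).mp ((PySem.Set.mem_ofList _ _).mpr (by simpa using hmem))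
            exact fun h => this (List.append_eq_nil_iff.mp h).2
          rw [hdcont x, decide_eq_false hxd]
          simp
        rw [e1, e2, e3, List.append_nil, List.nil_append]
      have hvalspre_nil : ∀ x, x ∉ allKeys pre → vals x pre = [] := by
        intro x hx
        by_contra h
        exact hx ((mem_allKeys_iff x pre).mpr h)
      have hitems : M pre ++ ((d.map (·.1)).filter (fun y => !((allKeys pre).contains y))).map
            (fun k => (k, (PySem.Dict.mk d).getD k 0))
          = M (pre ++ [d]) := by
        show _ = (allKeys (pre ++ [d])).map (fun k => (k, (vals k (pre ++ [d])).headD 0))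
        rw [h1, List.map_append]
        congr 1
        · apply List.map_congr_left
          intro k hk
          have hne : vals k pre ≠ [] := (mem_allKeys_iff k pre).mp hk
          rw [vals_append, headD_append_of_ne_nil hne]
        · apply List.map_congr_left
          intro k hk
          rcases hmemF k hk with ⟨hkd, hkp⟩
          have hget : ∃ v, (PySem.Dict.mk d).get? k = some v := by
            have := hdcont k
            rw [decide_eq_true hkd] at this
            cases hg' : (PySem.Dict.mk d).get? k with
            | none =>
              rw [PySem.Dict.contains_eq_isSome_get?, hg'] at this
              exact absurd this (by simp)
            | some v => exact ⟨v, rfl⟩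
          rcases hget with ⟨v, hv⟩
          rw [vals_append, hvalspre_nil k hkp, List.nil_append, hvals_single k, hv,
            PySem.Dict.getD_of_get?_eq_some _ 0 hv]
          rfl
      have hgood' : goodB (pre ++ [d]) = true := by
        apply (goodB_iff (pre ++ [d])).mpr
        intro k v hv
        rw [vals_append] at hv ⊢
        by_cases hm : k ∈ allKeys pre
        · have hne : vals k pre ≠ [] := (mem_allKeys_iff k pre).mp hm
          rw [headD_append_of_ne_nil hne]
          rcases List.mem_append.mp hv with hvl | hvr
          · exact (goodB_iff pre).mp hg k v hvl
          · rw [hvals_single k] at hvr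
            cases hdk : (PySem.Dict.mk d).get? k with
            | none => rw [hdk] at hvr; exact absurd hvr (by simp)
            | some v' =>
              rw [hdk] at hvr
              have hvv' : v = v' := by simpa using hvr
              have hkks : k ∈ allKeys (pre ++ d :: rest) := hsubpre k hm
              have hcf := List.any_eq_false.mp hc k hkks
              unfold confl at hcf
              rw [hdk, hrget k, if_pos hm] at hcf
              have : (vals k pre).headD 0 = v' := by
                by_contra hne'
                exact hcf (by simpa using hne')
              rw [hvv', ← this]
        · rw [hvalspre_nil k hm, List.nil_append] at hv ⊢
          rw [hvals_single k] at hv ⊢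
          cases hdk : (PySem.Dict.mk d).get? k with
          | none => rw [hdk] at hv; exact absurd hv (by simp)
          | some v' =>
            rw [hdk] at hv
            simpa using hv
      have hih := ih (pre ++ [d]) (by
        intro d' hd'
        apply hnd
        simp only [List.append_assoc, List.singleton_append] at hd'
        exact hd') hgood'
      simp only [List.append_assoc, List.singleton_append] at hih
      rw [hfilter, hitems]
      exact hih

theorem A_eq (dicts : List (List (String × Int))) (hnd : ∀ d ∈ dicts, (d.map (·.1)).Nodup) :
    TryCollapseDicts dicts = if goodB dicts then some (M dicts) else none := by
  have hfold : ∀ (xss : List (List (String × Int))) (s : PySem.Set String),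
      xss.foldl (fun ks d => PySem.Set.union ks (d.map (·.1))) s =
        PySem.Set.update s (xss.flatMap (fun d => d.map (·.1))) := by
    intro xss
    induction xss with
    | nil => intro s; rfl
    | cons d rest ih =>
      intro s
      rw [List.foldl_cons, ih, List.flatMap_cons]
      show _ = ((d.map (·.1)) ++ _).foldl PySem.Set.add s
      rw [List.foldl_append]
      rfl
  have h0 := aOuter_spec dicts [] (by simpa using hnd) rfl
  simp only [List.nil_append] at h0
  show (aOuter dicts (dicts.foldl (fun ks d => PySem.Set.union ks (d.map (·.1))) PySem.Set.empty)
      PySem.Dict.empty).map PySem.Dict.items = _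
  rw [hfold dicts PySem.Set.empty]
  have h0' : aOuter dicts (PySem.Set.update PySem.Set.empty (dicts.flatMap (fun d => d.map (·.1))))
      PySem.Dict.empty = if goodB dicts = true then some (PySem.Dict.mk (M dicts)) else none := h0
  rw [h0']
  split <;> rfl

theorem bGroups_getD (ds : List (List (String × Int))) (g : PySem.Dict String (List Int)) (k : String) :
    (ds.foldl (fun g d => d.foldl (fun g p => g.modify p.1 [] (· ++ [p.2])) g) g).getD k []
      = g.getD k [] ++ vals k ds := by
  induction ds generalizing g with
  | nil => simp [vals]
  | cons d rest ih =>
    rw [List.foldl_cons, ih, PySem.Dict.getD_foldl_modify_append, vals_cons, List.append_assoc]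

theorem bGroups_keys (ds : List (List (String × Int))) (g : PySem.Dict String (List Int)) :
    (ds.foldl (fun g d => d.foldl (fun g p => g.modify p.1 [] (· ++ [p.2])) g) g).keys
      = PySem.Set.update g.keys (ds.flatMap (fun d => d.map (·.1))) := by
  induction ds generalizing g with
  | nil => simp [PySem.Set.update]
  | cons d rest ih =>
    rw [List.foldl_cons, ih, PySem.Dict.keys_foldl_modify_key d (fun p => p.1) [] (fun g p v => v ++ [p.2]) g]
    show _ = (List.flatMap _ (d :: rest)).foldl PySem.Set.add _
    rw [List.flatMap_cons, List.foldl_append]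
    rfl

theorem bCollect_spec (l : List (String × List Int)) (r : PySem.Dict String Int)
    (hnd : (l.map (·.1)).Nodup) (hfresh : ∀ p ∈ l, r.contains p.1 = false) :
    bCollect l r =
      if l.all (fun p => match p.2 with | [] => false | v :: t => t.all (fun w => w == v))
      then some (PySem.Dict.mk (r.items ++ l.map (fun p => (p.1, p.2.headD 0))))
      else none := by
  induction l generalizing r with
  | nil => simp [bCollect]
  | cons p rest ih =>
    obtain ⟨k, vs⟩ := p
    have hnd' : (k :: rest.map (·.1)).Nodup := by simpa using hnd
    obtain ⟨hknotin, hndr⟩ := List.nodup_cons.mp hnd'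
    rw [bCollect.eq_def]
    dsimp only
    cases vs with
    | nil => simp
    | cons v t =>
      dsimp only
      have hrc : r.contains k = false := hfresh (k, v :: t) (by simp)
      by_cases hconf : t.any (fun w => w ≠ v) = true
      · rw [if_pos hconf]
        have : t.all (fun w => w == v) = false := by
          rcases List.any_eq_true.mp hconf with ⟨w, hw, hwv⟩
          have hwv' : w ≠ v := by simpa using hwv
          exact List.all_eq_false.mpr ⟨w, hw, by simp [hwv']⟩
        simp [List.all_cons, this]
      · have hconf' : t.any (fun w => w ≠ v) = false := by simpa using hconf
        rw [if_neg hconf]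
        have hall : t.all (fun w => w == v) = true := by
          apply List.all_eq_true.mpr
          intro w hw
          have := List.any_eq_false.mp hconf' w hw
          simpa using this
        have hfresh' : ∀ q ∈ rest, (r.insert k v).contains q.1 = false := by
          intro q hq
          have hne : q.1 ≠ k := fun h => hknotin (h ▸ List.mem_map.mpr ⟨q, hq, rfl⟩)
          rw [PySem.Dict.contains_insert, beq_eq_false_iff_ne.mpr hne, hfresh q (List.mem_cons_of_mem _ hq)]
          rfl
        rw [ih (r.insert k v) hndr hfresh']
        rw [PySem.Dict.items_insert_of_not_contains r v hrc]
        simp only [List.all_cons, hall, Bool.true_and, List.append_assoc, List.cons_append,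
          List.map_cons, List.nil_append, List.headD_cons]

theorem pvAllCongr {α : Type} (l : List α) (p q : α → Bool) (h : ∀ x ∈ l, p x = q x) :
    l.all p = l.all q := by
  induction l with
  | nil => rfl
  | cons a t ih => simp only [List.all_cons, h a (by simp), ih (fun x hx => h x (by simp [hx]))]

theorem B_eq (dicts : List (List (String × Int))) :
    TryCollapseDicts_alt dicts = if goodB dicts then some (M dicts) else none := by
  unfold TryCollapseDicts_alt
  have hkeys : (bGroups dicts).keys = allKeys dicts := by
    rw [bGroups, bGroups_keys]
    rfl
  have hnodup : (bGroups dicts).keys.Nodup := by rw [hkeys]; exact PySem.Set.nodup_ofList _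
  have hitems : (bGroups dicts).items = (allKeys dicts).map (fun k => (k, vals k dicts)) := by
    rw [PySem.Dict.items_eq_map_keys _ hnodup [], hkeys]
    apply List.map_congr_left
    intro k _
    rw [bGroups, bGroups_getD]
    simp
  have hndl : (((allKeys dicts).map (fun k => (k, vals k dicts))).map (·.1)).Nodup := by
    rw [List.map_map]
    rw [show ((·.1) ∘ fun k => (k, vals k dicts)) = (id : String → String) from rfl, List.map_id]
    exact PySem.Set.nodup_ofList _
  rw [hitems, bCollect_spec _ _ hndl (fun p _ => PySem.Dict.contains_empty p.1)]
  have hcond : ((allKeys dicts).map (fun k => (k, vals k dicts))).all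
      (fun p => match p.2 with | [] => false | v :: t => t.all (fun w => w == v)) = goodB dicts := by
    rw [List.all_map]
    unfold goodB
    apply pvAllCongr
    intro k hk
    have hne : vals k dicts ≠ [] := (mem_allKeys_iff k dicts).mp hk
    cases hvals : vals k dicts with
    | nil => exact absurd hvals hne
    | cons v t =>
      simp only [Function.comp_apply]
      rw [hvals]
  rw [hcond]
  have hM : ((allKeys dicts).map (fun k => (k, vals k dicts))).map (fun p => (p.1, p.2.headD 0)) = M dicts := by
    rw [List.map_map]
    rfl
  cases hgb : goodB dicts with
  | false => rfl
  | true =>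
    simp only [if_true]
    have : (PySem.Dict.empty : PySem.Dict String Int).items = [] := rfl
    rw [this, List.nil_append, hM]
    rfl

-- ===== VERDICT (by name: the statement is the Claim_ definition above) =====
theorem TryCollapseDicts_spec : Claim_equal_TryCollapseDicts := by
  intro dicts _hdom hpre
  unfold Spec_TryCollapseDicts
  rw [A_eq dicts hpre, B_eq dicts]
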